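-- pv_equiv track=rewrite | github.com/Ingeniums/ingecode-e1-challenges | array-unsum/generator/generate.py | calculate_sub_sums
-- ===== SOURCE A (Python) =====
-- window_length = 6
--
-- def calculate_sub_sums(arr):
--     sums = [sum(arr[0:window_length])]
--     for i in range(1, len(arr)):
--         result = sums[-1]
--         if i + window_length - 1 < len(arr):
--             result += arr[i + window_length - 1]
--         result -= arr[i - 1]
--         sums.append(result)
--     return sums
-- ===== SOURCE B (Python) =====
-- window_length = 6
--
-- def calculate_sub_sums(arr):
--     n = len(arr)
--     prefix = [0]
--     for x in arr:
--         prefix.append(prefix[-1] + x)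
--     return [prefix[min(i + window_length, n)] - prefix[i] for i in range(n)]
-- ===== Notes on version B (the rewrite author's own statement) =====
-- stated objective: simpler
-- what changed: Replaces A's incremental last-element-plus/minus window maintenance with a prefix-sum table and a direct per-index difference lookup.
-- intended difference: On the empty list A returns a singleton zero (the seed sum of the empty window survives as leftover state) while B returns the empty list, the intended result for zero windows. — e.g. on calculate_sub_sums([]): A returns [0], B returns []
import Mathlib
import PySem

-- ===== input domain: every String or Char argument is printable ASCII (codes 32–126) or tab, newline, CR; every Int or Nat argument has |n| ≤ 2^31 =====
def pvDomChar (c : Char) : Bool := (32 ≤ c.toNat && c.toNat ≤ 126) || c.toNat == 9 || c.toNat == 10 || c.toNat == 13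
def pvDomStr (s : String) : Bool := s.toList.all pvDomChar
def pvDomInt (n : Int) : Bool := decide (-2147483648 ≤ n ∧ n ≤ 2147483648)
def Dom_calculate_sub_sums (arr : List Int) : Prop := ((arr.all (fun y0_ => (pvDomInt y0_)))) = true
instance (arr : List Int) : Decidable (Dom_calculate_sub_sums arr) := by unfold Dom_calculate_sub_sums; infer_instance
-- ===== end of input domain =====

-- B replaces A's incremental window maintenance by a prefix-sum table with per-index difference lookups (objective: simpler).

-- ===== PORT A =====
-- window_length = 6
def windowLength : Int := 6

def calculate_sub_sums (arr : List Int) : List Int :=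
  let sums : List Int := [(PySem.List.slice arr (some 0) (some windowLength)).sum]
  (PySem.List.pyRange 1 (arr.length : Int) 1).foldl (fun sums i =>
    let result := PySem.List.pyGetD sums (-1) 0
    let result := if i + windowLength - 1 < (arr.length : Int)
                  then result + PySem.List.pyGetD arr (i + windowLength - 1) 0
                  else result
    let result := result - PySem.List.pyGetD arr (i - 1) 0
    sums ++ [result]) sums

-- ===== PORT B =====
def calculate_sub_sums_alt (arr : List Int) : List Int :=
  let n : Int := arr.length
  let pref := arr.foldl (fun p x => p ++ [PySem.List.pyGetD p (-1) 0 + x]) [(0 : Int)]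
  (PySem.List.pyRange 0 n 1).map (fun i =>
    PySem.List.pyGetD pref (min (i + windowLength) n) 0 - PySem.List.pyGetD pref i 0)

-- ===== PRECONDITION & SPEC =====
-- On the empty list A returns a singleton zero (the seed sum of the empty window survives as
-- leftover state) while B returns the empty list, the intended result: zero windows, zero sums.
def D_calculate_sub_sums (arr : List Int) : Prop := arr = []
instance (arr : List Int) : Decidable (D_calculate_sub_sums arr) := by unfold D_calculate_sub_sums; infer_instance

def Spec_calculate_sub_sums (arr : List Int) (out : List Int) : Prop := ¬ D_calculate_sub_sums arr → out = calculate_sub_sums_alt arr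
instance (arr : List Int) (out : List Int) : Decidable (Spec_calculate_sub_sums arr out) := by unfold Spec_calculate_sub_sums; infer_instance

def pvDiffWitness_calculate_sub_sums : List Int := []
def pvDiffWitnessOut_calculate_sub_sums : (List Int) × (List Int) := ([0], [])

-- ===== CLAIM (what is proved, stated in full; the proofs are below) =====
def Claim_unchanged_calculate_sub_sums : Prop := ∀ (arr : List Int), Dom_calculate_sub_sums arr → Spec_calculate_sub_sums arr (calculate_sub_sums arr)
def Claim_changed_calculate_sub_sums : Prop := Dom_calculate_sub_sums (pvDiffWitness_calculate_sub_sums) ∧ D_calculate_sub_sums (pvDiffWitness_calculate_sub_sums) ∧ calculate_sub_sums (pvDiffWitness_calculate_sub_sums) = pvDiffWitnessOut_calculate_sub_sums.1 ∧ calculate_sub_sums_alt (pvDiffWitness_calculate_sub_sums) = pvDiffWitnessOut_calculate_sub_sums.2 ∧ pvDiffWitnessOut_calculate_sub_sums.1 ≠ pvDiffWitnessOut_calculate_sub_sums.2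
def Claim_exact_calculate_sub_sums : Prop := ∀ (arr : List Int), Dom_calculate_sub_sums arr → D_calculate_sub_sums arr → calculate_sub_sums arr ≠ calculate_sub_sums_alt arr

-- ===== LEMMAS AND PROOFS =====

-- The common window-sum specification: entry i is sum(arr[i:i+6]).
def winSums (arr : List Int) : List Int :=
  (List.range arr.length).map (fun i => ((arr.drop i).take 6).sum)

-- B's prefix loop computes the running-sum list (scanl).
theorem foldl_pref (xs : List Int) (acc : List Int) (a : Int) :
    xs.foldl (fun p x => p ++ [PySem.List.pyGetD p (-1) 0 + x]) (acc ++ [a]) =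
      acc ++ List.scanl (· + ·) a xs := by
  induction xs generalizing acc a with
  | nil => simp
  | cons x t ih =>
    simp only [List.foldl_cons, PySem.List.pyGetD_neg_one_append_singleton, List.scanl_cons]
    rw [ih (acc ++ [a]) (a + x), List.append_assoc]
    rfl

-- Entry k of the running-sum list is the sum of the first k elements.
theorem scanl_getD (xs : List Int) (a : Int) (k : Nat) (hk : k ≤ xs.length) :
    (List.scanl (· + ·) a xs).getD k 0 = a + (xs.take k).sum := by
  induction xs generalizing a k with
  | nil =>
    have : k = 0 := by simpa using hk
    subst this; simp
  | cons x t ih =>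
    cases k with
    | zero => simp
    | succ k =>
      simp only [List.scanl_cons, List.getD_cons_succ, List.take_succ_cons, List.sum_cons]
      rw [ih (a + x) k (by simpa using hk)]
      ring

theorem alt_eq_winSums (arr : List Int) : calculate_sub_sums_alt arr = winSums arr := by
  have hpref := foldl_pref arr [] 0
  simp only [List.nil_append] at hpref
  unfold winSums
  simp only [calculate_sub_sums_alt, windowLength, hpref]
  rw [PySem.List.pyRange_zero_nat, List.map_map]
  apply List.map_congr_left
  intro k hk
  have hk' : k < arr.length := List.mem_range.mp hk
  have hmin : min ((k : Int) + 6) ((arr.length : Int)) = (((min (k + 6) arr.length : Nat)) : Int) := by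
    push_cast; rfl
  simp only [Function.comp_apply, hmin, PySem.List.pyGetD_natCast]
  rw [scanl_getD arr 0 (min (k + 6) arr.length) (by omega),
      scanl_getD arr 0 k (by omega)]
  rw [← List.take_eq_take_min,
      show k + 6 = k + 6 from rfl, List.take_add, List.sum_append]
  ring

-- Taking one more element adds its value (or nothing past the end).
theorem sum_take_succ (t : List Int) (n : Nat) :
    (t.take (n + 1)).sum = (t.take n).sum + (if n < t.length then t.getD n 0 else 0) := by
  rw [List.take_add_one, List.sum_append]
  by_cases hc : n < t.length
  · rw [List.getElem?_eq_getElem hc]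
    simp [hc]
  · rw [List.getElem?_eq_none (by omega)]
    simp [hc]

-- A's incremental update: slide the 6-window one step to the right.
theorem window_step (arr : List Int) (m : Nat) (h1 : 1 ≤ m) (h2 : m < arr.length) :
    ((arr.drop m).take 6).sum =
      ((arr.drop (m - 1)).take 6).sum
        + (if m + 5 < arr.length then arr.getD (m + 5) 0 else 0)
        - arr.getD (m - 1) 0 := by
  have hdrop : arr.drop (m - 1) = arr.getD (m - 1) 0 :: arr.drop m := by
    rw [List.drop_eq_getElem_cons (show m - 1 < arr.length by omega),
        List.getD_eq_getElem arr 0 (show m - 1 < arr.length by omega)]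
    congr 2
    omega
  have h6 : ((arr.drop m).take 6).sum =
      ((arr.drop m).take 5).sum + (if m + 5 < arr.length then arr.getD (m + 5) 0 else 0) := by
    rw [show (6 : Nat) = 5 + 1 from rfl, sum_take_succ]
    congr 1
    by_cases hc : m + 5 < arr.length
    · rw [if_pos (by simp; omega), if_pos hc,
          List.getD_eq_getElem _ 0 (by simp; omega), List.getD_eq_getElem arr 0 hc,
          List.getElem_drop]
    · rw [if_neg (by simp; omega), if_neg hc]
  rw [h6, hdrop]
  simp only [List.take_succ_cons, List.sum_cons]
  ring

-- The loop invariant: after iterations 1..m-1 the accumulator holds the first m window sums.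
theorem a_loop (arr : List Int) (m : Nat) (h1 : 1 ≤ m) (h2 : m ≤ arr.length) :
    (PySem.List.pyRange 1 (m : Int) 1).foldl (fun sums i =>
      let result := PySem.List.pyGetD sums (-1) 0
      let result := if i + windowLength - 1 < (arr.length : Int)
                    then result + PySem.List.pyGetD arr (i + windowLength - 1) 0
                    else result
      let result := result - PySem.List.pyGetD arr (i - 1) 0
      sums ++ [result]) [(arr.take 6).sum] =
    (List.range m).map (fun i => ((arr.drop i).take 6).sum) := by
  induction m, h1 using Nat.le_induction with
  | base => simp [PySem.List.pyRange_one_eq_nil]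
  | succ m hm ih =>
    have hrange : PySem.List.pyRange 1 ((m : Int) + 1) 1 = PySem.List.pyRange 1 (m : Int) 1 ++ [(m : Int)] :=
      PySem.List.pyRange_one_succ_right (by exact_mod_cast hm)
    push_cast
    rw [hrange, List.foldl_append, ih (by omega)]
    simp only [List.foldl_cons, List.foldl_nil]
    have hlast : (List.range m).map (fun i => ((arr.drop i).take 6).sum) =
        (List.range (m - 1)).map (fun i => ((arr.drop i).take 6).sum) ++ [((arr.drop (m - 1)).take 6).sum] := by
      conv_lhs => rw [show m = (m - 1) + 1 by omega, List.range_succ]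
      rw [List.map_append, List.map_cons, List.map_nil]
    have hcond : ((m : Int) + windowLength - 1 < (arr.length : Int)) ↔ (m + 5 < arr.length) := by
      unfold windowLength; omega
    have hi1 : (m : Int) + windowLength - 1 = ((m + 5 : Nat) : Int) := by unfold windowLength; omega
    have hi2 : (m : Int) - 1 = ((m - 1 : Nat) : Int) := by omega
    rw [hlast, PySem.List.pyGetD_neg_one_append_singleton, hi1, hi2,
        PySem.List.pyGetD_natCast, PySem.List.pyGetD_natCast, ← hlast, List.range_succ,
        List.map_append]
    simp only [List.map_cons, List.map_nil]
    congr 1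
    rw [window_step arr m hm (by omega)]
    by_cases hc : m + 5 < arr.length
    · rw [if_pos (by exact_mod_cast hc : ((m + 5 : Nat) : Int) < (arr.length : Int)), if_pos hc]
    · rw [if_neg (by exact_mod_cast hc : ¬ ((m + 5 : Nat) : Int) < (arr.length : Int)), if_neg hc]
      ring_nf

theorem a_eq_winSums (arr : List Int) (h : arr ≠ []) : calculate_sub_sums arr = winSums arr := by
  have hlen : 1 ≤ arr.length := by
    cases arr with
    | nil => exact absurd rfl h
    | cons x t => simp
  have hinit : (PySem.List.slice arr (some 0) (some windowLength)).sum = (arr.take 6).sum := by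
    unfold windowLength
    simp [pysem]
  unfold winSums
  simp only [calculate_sub_sums, hinit]
  exact a_loop arr arr.length hlen le_rfl

-- ===== VERDICT (by name: the statement is the Claim_ definition above) =====
theorem calculate_sub_sums_spec : Claim_unchanged_calculate_sub_sums := by
  intro arr _ hD
  rw [a_eq_winSums arr hD, alt_eq_winSums arr]

theorem calculate_sub_sums_changed : Claim_changed_calculate_sub_sums := by
  unfold Claim_changed_calculate_sub_sums; decide

theorem calculate_sub_sums_tight : Claim_exact_calculate_sub_sums := by
  intro arr _ hD
  subst hD; decide
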